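-- pv_equiv track=rewrite | github.com/TingTingShao/computing_for_bioinformatics | assignment02/PythonAssignment2022.py | get_parents_for_cell
-- ===== SOURCE A (Python) =====
-- def get_parents_for_cell(query_cell, ds_lineage_query):
--     if query_cell not in ds_lineage_query.keys():
--         return []
--     else:
--         parent=ds_lineage_query[query_cell]
--         result = [parent]
--         ###use recursion to search for parent cells
--         new_result=get_parents_for_cell(parent, ds_lineage_query)
--         list= result + new_result
--         return list
-- ===== SOURCE B (Python) =====
-- def get_parents_for_cell(query_cell, ds_lineage_query):
--     # Walk the parent chain iteratively; an acyclic mapping of size n can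
--     # yield at most n ancestors, so n iterations always suffice.
--     result = []
--     current = query_cell
--     for _ in range(len(ds_lineage_query)):
--         if current not in ds_lineage_query:
--             break
--         parent = ds_lineage_query[current]
--         result.append(parent)
--         current = parent
--     return result
-- ===== Notes on version B (the rewrite author's own statement) =====
-- stated objective: idiomatic
-- what changed: Replaces A's recursive self-call with repeated list concatenation by a bounded iterative for-loop (at most len(dict) steps, which suffices for any acyclic mapping) that walks the parent chain and appends to one accumulator.
import Mathlib
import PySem

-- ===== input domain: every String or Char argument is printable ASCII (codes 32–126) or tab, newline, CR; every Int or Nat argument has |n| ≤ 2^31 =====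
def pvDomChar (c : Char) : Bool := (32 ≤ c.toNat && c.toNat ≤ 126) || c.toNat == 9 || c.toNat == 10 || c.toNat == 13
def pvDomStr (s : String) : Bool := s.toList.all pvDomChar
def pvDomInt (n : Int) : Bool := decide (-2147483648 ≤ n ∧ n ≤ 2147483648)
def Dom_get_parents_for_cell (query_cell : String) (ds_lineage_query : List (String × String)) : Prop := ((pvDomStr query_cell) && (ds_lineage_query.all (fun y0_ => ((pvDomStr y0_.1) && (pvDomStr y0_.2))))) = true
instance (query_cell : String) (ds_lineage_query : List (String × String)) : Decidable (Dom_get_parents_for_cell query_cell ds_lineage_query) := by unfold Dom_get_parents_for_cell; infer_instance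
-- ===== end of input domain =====

-- B replaces A's recursion (with repeated list concatenation) by a bounded iterative
-- for-loop over range(len(dict)) that walks the parent chain with one accumulator;
-- same return value on terminating chains, no speed claim.

-- ===== PORT A =====
-- A's recursion 'return [] / [parent] ++ recurse(parent)', made total by a fuel guard only.
def pvGoA : Nat → String → List (String × String) → List String
  | 0, _, _ => []
  | n + 1, query_cell, ds =>
      match ds.lookup query_cell with
      | none => []
      | some parent => [parent] ++ pvGoA n parent ds

def get_parents_for_cell (query_cell : String) (ds_lineage_query : List (String × String)) : List String :=
  pvGoA (ds_lineage_query.length + 1) query_cell ds_lineage_query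

-- ===== PORT B =====
-- B's for-loop over range(len(ds)) with break, as a fold over pyRange with a
-- (current, result, stopped) state; 'stopped' renders Python's 'break'.
def pvStepB (ds : List (String × String)) (st : String × List String × Bool) (_ : Int) :
    String × List String × Bool :=
  match st with
  | (current, result, stopped) =>
    if stopped then (current, result, stopped)
    else
      match ds.lookup current with
      | none => (current, result, true)
      | some parent => (parent, result ++ [parent], false)

def get_parents_for_cell_alt (query_cell : String) (ds_lineage_query : List (String × String)) : List String :=
  ((PySem.List.pyRange 0 ds_lineage_query.length 1).foldl (pvStepB ds_lineage_query)
    (query_cell, [], false)).2.1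

-- ===== PRECONDITION & SPEC =====
-- does the parent chain starting at q leave the key set within n lookups?
def pvChainStops : Nat → String → List (String × String) → Bool
  | 0, q, ds => (ds.lookup q).isNone
  | n + 1, q, ds =>
      match ds.lookup q with
      | none => true
      | some parent => pvChainStops n parent ds

-- Pre_ excludes exactly the cyclic parent chains, on which Python A raises RecursionError:
-- the chain from query_cell must terminate, which for a terminating chain always happens
-- within ds.length lookups.
def Pre_get_parents_for_cell (query_cell : String) (ds_lineage_query : List (String × String)) : Prop :=
  pvChainStops ds_lineage_query.length query_cell ds_lineage_query = true
instance (query_cell : String) (ds_lineage_query : List (String × String)) : Decidable (Pre_get_parents_for_cell query_cell ds_lineage_query) := by unfold Pre_get_parents_for_cell; infer_instance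

def pvWitness_get_parents_for_cell : String × (List (String × String)) := ("a", [("a", "b"), ("b", "c")])

def Spec_get_parents_for_cell (query_cell : String) (ds_lineage_query : List (String × String)) (out : List String) : Prop := out = get_parents_for_cell_alt query_cell ds_lineage_query
instance (query_cell : String) (ds_lineage_query : List (String × String)) (out : List String) : Decidable (Spec_get_parents_for_cell query_cell ds_lineage_query out) := by unfold Spec_get_parents_for_cell; infer_instance

-- ===== CLAIM =====
def Claim_equal_get_parents_for_cell : Prop := ∀ (query_cell : String) (ds_lineage_query : List (String × String)), Dom_get_parents_for_cell query_cell ds_lineage_query → Pre_get_parents_for_cell query_cell ds_lineage_query → Spec_get_parents_for_cell query_cell ds_lineage_query (get_parents_for_cell query_cell ds_lineage_query)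

-- ===== LEMMAS AND PROOFS =====
-- once stopped, the fold is the identity on the state
theorem pvStepB_stopped (ds : List (String × String)) (l : List Int) (cur : String) (acc : List String) :
    l.foldl (pvStepB ds) (cur, acc, true) = (cur, acc, true) := by
  induction l with
  | nil => rfl
  | cons x xs ih => simpa [pvStepB] using ih

-- loop invariant: |l| iterations of B's step compute acc ++ (A's chain with fuel |l|)
theorem pvFoldB_eq (ds : List (String × String)) :
    ∀ (l : List Int) (cur : String) (acc : List String),
    (l.foldl (pvStepB ds) (cur, acc, false)).2.1 = acc ++ pvGoA l.length cur ds := by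
  intro l
  induction l with
  | nil => intro cur acc; simp [pvGoA]
  | cons x xs ih =>
      intro cur acc
      simp only [List.foldl_cons, pvStepB, if_neg (Bool.false_ne_true), List.length_cons, pvGoA]
      cases h : ds.lookup cur with
      | none => simp [pvStepB_stopped]
      | some parent => simp [ih parent (acc ++ [parent])]

-- on a chain that stops within n lookups, one extra unit of fuel changes nothing
theorem pvGoA_fuel_succ (ds : List (String × String)) :
    ∀ (n : Nat) (q : String), pvChainStops n q ds = true → pvGoA (n + 1) q ds = pvGoA n q ds := by
  intro n
  induction n with
  | zero =>
      intro q h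
      simp only [pvChainStops, Option.isNone_iff_eq_none] at h
      simp [pvGoA, h]
  | succ n ih =>
      intro q h
      simp only [pvChainStops] at h
      simp only [pvGoA]
      cases hq : ds.lookup q with
      | none => rfl
      | some parent =>
          rw [hq] at h
          simpa using congrArg (fun t => [parent] ++ t) (ih parent h)

-- ===== VERDICT =====
theorem get_parents_for_cell_spec : Claim_equal_get_parents_for_cell := by
  intro q ds _ hpre
  unfold Spec_get_parents_for_cell get_parents_for_cell get_parents_for_cell_alt
  have hlen : (PySem.List.pyRange 0 ds.length 1).length = ds.length := by
    simp [PySem.List.length_pyRange_one]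
  rw [pvFoldB_eq ds _ q [], hlen, pvGoA_fuel_succ ds ds.length q hpre]
  simp
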